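-- pv_equiv track=rewrite | github.com/parkjh4550/Algorithm | Programmers/DFS_BFS/여행경로.py | solution
-- ===== SOURCE A (Python) =====
-- def solution(tickets):
--     # 끝지점을 찾은 후에 역으로 시작지점까지 찾는 방법이다.
--     # 이는 모든 경로가 반드시 연결된다는 가정이 있기 때문에 가능함.
--     # 또한 모든 지점을 지나는 경우가 반드시 있기 때문.
--     # DSF  형식
--     #build graph
--     graph = {}
--     for t in tickets:
--         graph[t[0]] = graph.get(t[0], []) + [t[1]]
--     for k in graph:
--         graph[k].sort(reverse=True)
--
--     stack=["ICN"]
--     path = []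
--
--     while len(stack) > 0:
--         current = stack[-1]
--         if current not in graph or len(graph[current]) == 0:
--             #현재 노드가 끝지점이면  path에 추가.
--             path.append(stack.pop())
--         else:
--             #현재 노드가 다른 지점으로 이어진다면 그 지점을  stack에 추가.
--             stack.append(graph[current][-1])
--             graph[current] = graph[current][:-1]
--
--     return path[::-1]
-- ===== SOURCE B (Python) =====
-- def solution(tickets):
--     # Same Eulerian-path problem solved by genuine recursion (Hierholzer's
--     # post-order DFS) instead of A's explicit stack loop.
--     graph = {}
--     for t in tickets:
--         graph.setdefault(t[0], []).append(t[1])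
--     for k in graph:
--         graph[k].sort(reverse=True)
--
--     path = []
--
--     def dfs(node):
--         while graph.get(node):
--             dfs(graph[node].pop())
--         path.append(node)
--
--     dfs("ICN")
--     return path[::-1]
-- ===== Notes on version B (the rewrite author's own statement) =====
-- stated objective: alternative
-- what changed: A's explicit-stack Hierholzer loop is replaced by a genuinely recursive post-order DFS (dfs pops the lexicographically smallest remaining edge, recurses, and appends the node to the shared path after its while loop), keeping the same reverse-sorted adjacency dict and tie-break.
import Mathlib
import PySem

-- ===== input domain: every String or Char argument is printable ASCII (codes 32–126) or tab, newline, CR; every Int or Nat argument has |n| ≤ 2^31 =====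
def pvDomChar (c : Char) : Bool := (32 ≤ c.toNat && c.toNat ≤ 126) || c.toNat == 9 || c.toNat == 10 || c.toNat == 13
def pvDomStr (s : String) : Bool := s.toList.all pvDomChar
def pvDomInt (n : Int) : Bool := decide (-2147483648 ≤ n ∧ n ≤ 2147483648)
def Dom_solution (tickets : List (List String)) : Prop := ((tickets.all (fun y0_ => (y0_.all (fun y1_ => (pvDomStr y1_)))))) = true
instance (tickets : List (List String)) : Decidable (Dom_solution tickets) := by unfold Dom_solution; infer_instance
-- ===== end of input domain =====

-- B replaces A's explicit-stack Hierholzer loop with a genuinely recursive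
-- post-order DFS over the same adjacency dict (alternative decomposition, similar cost).

abbrev GD := PySem.Dict String (List String)

-- ===== PORT A =====
-- graph = {}; for t in tickets: graph[t[0]] = graph.get(t[0], []) + [t[1]]
def buildA (tickets : List (List String)) : GD :=
  tickets.foldl (fun g t =>
    g.insert (PySem.List.pyGetD t 0 "")
      (g.getD (PySem.List.pyGetD t 0 "") [] ++ [PySem.List.pyGetD t 1 ""])) PySem.Dict.empty

-- for k in graph: graph[k].sort(reverse=True)
def sortA (g : GD) : GD :=
  g.keys.foldl (fun d k => d.insert k (PySem.List.sorted (d.getD k []) (fun x => x) true)) g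

-- the while loop; fuel 2*len(tickets)+1 always suffices (each iteration strictly
-- decreases 2*(edges left in graph) + len(stack), so the fuel-0 branch is unreachable)
def loopA : Nat → GD → List String → List String → List String
  | 0, _, _, path => path
  | fuel+1, g, stack, path =>
    if 0 < stack.length then
      let current := PySem.List.pyGetD stack (-1) ""
      if !g.contains current || (g.getD current []).length == 0 then
        loopA fuel g stack.dropLast (path ++ [current])
      else
        loopA fuel (g.insert current (PySem.List.slice (g.getD current []) none (some (-1))))
          (stack ++ [PySem.List.pyGetD (g.getD current []) (-1) ""]) path
    else path

def solution (tickets : List (List String)) : List String :=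
  (loopA (2 * tickets.length + 1) (sortA (buildA tickets)) ["ICN"] []).reverse

-- ===== PORT B =====
-- graph = {}; for t in tickets: graph.setdefault(t[0], []).append(t[1])
def buildB (tickets : List (List String)) : GD :=
  tickets.foldl (fun g t =>
    g.modify (PySem.List.pyGetD t 0 "") [] (· ++ [PySem.List.pyGetD t 1 ""])) PySem.Dict.empty

-- for k in graph: graph[k].sort(reverse=True)
def sortB (g : GD) : GD :=
  g.keys.foldl (fun d k => d.insert k (PySem.List.sorted (d.getD k []) (fun x => x) true)) g

-- dfs(node): while graph.get(node): dfs(graph[node].pop()); path.append(node)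
-- snd of the result = the portion this call appends to the shared path, in order;
-- the while loop's next iteration is the recursive re-entry on the same node;
-- .pop() on a list is (last element, dropLast).  fuel len(tickets)+1 always
-- suffices (each re-entry first removes one edge, so the fuel-0 branch is unreachable)
def dfsB : Nat → GD → String → GD × List String
  | 0, g, _ => (g, [])
  | fuel+1, g, node =>
    let lst := (g.get? node).getD []
    if lst.isEmpty then (g, [node])
    else
      let nxt := PySem.List.pyGetD lst (-1) ""
      let r1 := dfsB fuel (g.insert node lst.dropLast) nxt
      let r2 := dfsB fuel r1.1 node
      (r2.1, r1.2 ++ r2.2)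

def solution_alt (tickets : List (List String)) : List String :=
  ((dfsB (tickets.length + 1) (sortB (buildB tickets)) "ICN").2).reverse

-- ===== PRECONDITION & SPEC =====
-- Pre_ excludes exactly the tickets with an inner list of fewer than 2 entries,
-- on which Python A raises IndexError at t[0]/t[1] (B raises there too).
def Pre_solution (tickets : List (List String)) : Prop :=
  ∀ t ∈ tickets, 2 ≤ t.length
instance (tickets : List (List String)) : Decidable (Pre_solution tickets) := by
  unfold Pre_solution; infer_instance

def pvWitness_solution : List (List String) := [["ICN", "AAA"], ["AAA", "ICN"]]

def Spec_solution (tickets : List (List String)) (out : List String) : Prop := out = solution_alt tickets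
instance (tickets : List (List String)) (out : List String) : Decidable (Spec_solution tickets out) := by unfold Spec_solution; infer_instance

-- ===== CLAIM (what is proved, stated in full; the proofs are below) =====
def Claim_equal_solution : Prop := ∀ (tickets : List (List String)), Dom_solution tickets → Pre_solution tickets → Spec_solution tickets (solution tickets)

-- ===== LEMMAS AND PROOFS =====

-- number of edges left in the graph
def eCnt (g : GD) : Nat := (g.items.map (fun p => p.2.length)).sum

theorem e_aux (l : List (String × List String)) (k : String) (v : List String)
    (hnd : (l.map Prod.fst).Nodup) (hc : l.any (fun p => p.1 == k) = true) :
    ((l.map (fun p => if p.1 == k then (k, v) else p)).map (fun p => p.2.length)).sum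
      + ((Option.map Prod.snd (l.find? (fun p => p.1 == k))).getD []).length
    = (l.map (fun p => p.2.length)).sum + v.length := by
  induction l with
  | nil => simp at hc
  | cons a t ih =>
    simp only [List.map_cons, List.nodup_cons] at hnd
    by_cases ha : (a.1 == k) = true
    · have hak : a.1 = k := by simpa using ha
      have hid : t.map (fun p => if p.1 == k then (k, v) else p) = t := by
        conv_rhs => rw [← List.map_id t]
        apply List.map_congr_left
        intro p hp
        have : p.1 ≠ k := by
          intro he
          have hm : p.1 ∈ t.map Prod.fst := List.mem_map_of_mem hp
          rw [he, ← hak] at hm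
          exact hnd.1 hm
        simp [this]
      simp only [List.find?_cons, ha, hid, List.map_cons, List.sum_cons]
      simp
      omega
    · rw [Bool.not_eq_true] at ha
      simp only [List.any_cons, ha, Bool.false_or] at hc
      have := ih hnd.2 hc
      rw [List.find?_cons_of_neg (by simp [ha])]
      simp only [List.map_cons, List.sum_cons]
      rw [if_neg (by simp [ha])]
      omega

theorem e_insert (g : PySem.Dict String (List String)) (k : String) (v : List String)
    (hnd : g.keys.Nodup) :
    eCnt (g.insert k v) + (g.getD k []).length = eCnt g + v.length := by
  by_cases hc : g.contains k = true
  · have := e_aux g.items k v (by simpa [PySem.Dict.keys] using hnd) (by simpa [PySem.Dict.contains] using hc)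
    simpa [eCnt, PySem.Dict.insert, hc, PySem.Dict.getD, PySem.Dict.get?] using this
  · have hg : g.getD k [] = [] :=
      PySem.Dict.getD_of_not_contains g [] (by simpa using hc)
    simp [eCnt, PySem.Dict.insert, hc, hg]

theorem dfsB_nodup (fuel : Nat) (g : PySem.Dict String (List String)) (node : String) (hnd : g.keys.Nodup) :
    ((dfsB fuel g node).1).keys.Nodup := by
  induction fuel generalizing g node with
  | zero => simpa [dfsB] using hnd
  | succ f ih =>
    simp only [dfsB]
    by_cases he : ((g.get? node).getD []).isEmpty
    · simpa [he] using hnd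
    · simp only [he]
      exact ih _ _ (ih _ _ (PySem.Dict.nodup_keys_insert g node _ hnd))

theorem dfsB_le (fuel : Nat) (g : PySem.Dict String (List String)) (node : String) (hnd : g.keys.Nodup) :
    eCnt (dfsB fuel g node).1 ≤ eCnt g := by
  induction fuel generalizing g node with
  | zero => simp [dfsB]
  | succ f ih =>
    simp only [dfsB]
    by_cases he : ((g.get? node).getD []).isEmpty
    · simp [he]
    · simp only [if_neg (by simp [he] : ¬ (((g.get? node).getD []).isEmpty = true))]
      have hg : g.getD node [] = (g.get? node).getD [] := rfl
      have hnd1 := PySem.Dict.nodup_keys_insert g node ((g.get? node).getD []).dropLast hnd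
      have h1 : eCnt (g.insert node ((g.get? node).getD []).dropLast) ≤ eCnt g := by
        have := e_insert g node ((g.get? node).getD []).dropLast hnd
        rw [hg] at this
        have hlen : ((g.get? node).getD []).dropLast.length ≤ ((g.get? node).getD []).length := by
          simp [List.length_dropLast]
        omega
      have h2 := ih (g.insert node ((g.get? node).getD []).dropLast) (PySem.List.pyGetD ((g.get? node).getD []) (-1) "") hnd1
      have h3 := ih (dfsB f (g.insert node ((g.get? node).getD []).dropLast) (PySem.List.pyGetD ((g.get? node).getD []) (-1) "")).1 node (dfsB_nodup f _ _ hnd1)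
      omega
theorem e_step (g : PySem.Dict String (List String)) (node : String) (hnd : g.keys.Nodup)
    (he : ¬ ((g.get? node).getD []).isEmpty = true) :
    eCnt (g.insert node ((g.get? node).getD []).dropLast) + 1 = eCnt g := by
  have hg : g.getD node [] = (g.get? node).getD [] := rfl
  have := e_insert g node ((g.get? node).getD []).dropLast hnd
  rw [hg] at this
  have hne : (g.get? node).getD [] ≠ [] := by
    intro hx; rw [hx] at he; simp at he
  have hpos : 0 < ((g.get? node).getD []).length := List.length_pos_iff.mpr hne
  have hlen : ((g.get? node).getD []).dropLast.length = ((g.get? node).getD []).length - 1 := by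
    simp [List.length_dropLast]
  omega

theorem dfsB_mono (f f' : Nat) (g : PySem.Dict String (List String)) (node : String)
    (hnd : g.keys.Nodup) (h : eCnt g < f) (h' : eCnt g < f') :
    dfsB f g node = dfsB f' g node := by
  induction f generalizing f' g node with
  | zero => omega
  | succ f ih =>
    cases f' with
    | zero => omega
    | succ f'' =>
      simp only [dfsB]
      by_cases he : ((g.get? node).getD []).isEmpty = true
      · simp [he]
      · simp only [if_neg he]
        have hstep := e_step g node hnd he
        have hnd1 := PySem.Dict.nodup_keys_insert g node ((g.get? node).getD []).dropLast hnd
        have h1 : dfsB f (g.insert node ((g.get? node).getD []).dropLast) (PySem.List.pyGetD ((g.get? node).getD []) (-1) "")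
            = dfsB f'' (g.insert node ((g.get? node).getD []).dropLast) (PySem.List.pyGetD ((g.get? node).getD []) (-1) "") := by
          apply ih _ _ _ hnd1 <;> omega
        rw [h1]
        have h2 : dfsB f (dfsB f'' (g.insert node ((g.get? node).getD []).dropLast) (PySem.List.pyGetD ((g.get? node).getD []) (-1) "")).1 node
            = dfsB f'' (dfsB f'' (g.insert node ((g.get? node).getD []).dropLast) (PySem.List.pyGetD ((g.get? node).getD []) (-1) "")).1 node := by
          apply ih _ _ _ (dfsB_nodup f'' _ _ hnd1)
          · have := dfsB_le f'' (g.insert node ((g.get? node).getD []).dropLast) (PySem.List.pyGetD ((g.get? node).getD []) (-1) "") hnd1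
            omega
          · have := dfsB_le f'' (g.insert node ((g.get? node).getD []).dropLast) (PySem.List.pyGetD ((g.get? node).getD []) (-1) "") hnd1
            omega
        rw [h2]

theorem loopA_nil (f : Nat) (g : PySem.Dict String (List String)) (path : List String) :
    loopA f g [] path = path := by
  cases f <;> simp [loopA]

theorem getD_ne_nil_of_cond_false (g : PySem.Dict String (List String)) (c : String)
    (h : (!g.contains c || (g.getD c []).length == 0) = false) : g.getD c [] ≠ [] := by
  intro hx
  simp [hx] at h

theorem slice_dropLast (l : List String) :
    PySem.List.slice l none (some (-1)) = l.dropLast := by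
  simpa using PySem.List.slice_to_neg_one (xs := l)

theorem loopA_mono (f f' : Nat) (g : PySem.Dict String (List String)) (stack path : List String)
    (hnd : g.keys.Nodup)
    (h : 2 * eCnt g + stack.length ≤ f) (h' : 2 * eCnt g + stack.length ≤ f') :
    loopA f g stack path = loopA f' g stack path := by
  induction f generalizing f' g stack path with
  | zero =>
    have hs : stack = [] := by
      cases stack with
      | nil => rfl
      | cons a t => simp at h
    rw [hs, loopA_nil, loopA_nil]
  | succ f ih =>
    by_cases hstack : stack = []
    · rw [hstack, loopA_nil, loopA_nil]
    · have hlen : 0 < stack.length := List.length_pos_iff.mpr hstack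
      cases f' with
      | zero => exfalso; omega
      | succ f'' =>
        simp only [loopA, if_pos hlen]
        by_cases hc : (!g.contains (PySem.List.pyGetD stack (-1) "") ||
            (g.getD (PySem.List.pyGetD stack (-1) "") []).length == 0) = true
        · rw [if_pos hc, if_pos hc]
          apply ih <;> first
            | exact hnd
            | (simp [List.length_dropLast]; omega)
        · rw [Bool.not_eq_true] at hc
          rw [if_neg (by simp [hc]), if_neg (by simp [hc])]
          have hne := getD_ne_nil_of_cond_false g (PySem.List.pyGetD stack (-1) "") hc
          have he : ¬ ((g.get? (PySem.List.pyGetD stack (-1) "")).getD []).isEmpty = true := by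
            simpa [List.isEmpty_iff] using hne
          have hstep := e_step g (PySem.List.pyGetD stack (-1) "") hnd he
          have hnd1 := PySem.Dict.nodup_keys_insert g (PySem.List.pyGetD stack (-1) "")
            ((g.get? (PySem.List.pyGetD stack (-1) "")).getD []).dropLast hnd
          rw [slice_dropLast]
          have hgd : g.getD (PySem.List.pyGetD stack (-1) "") []
              = (g.get? (PySem.List.pyGetD stack (-1) "")).getD [] := rfl
          rw [hgd]
          apply ih <;> first
            | exact hnd1
            | (simp; omega)
theorem sim (f : Nat) (g : PySem.Dict String (List String)) (node : String) (s path : List String)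
    (hnd : g.keys.Nodup) (h : 2 * eCnt g + s.length + 1 ≤ f) :
    loopA f g (s ++ [node]) path =
      loopA f (dfsB (eCnt g + 1) g node).1 s (path ++ (dfsB (eCnt g + 1) g node).2) := by
  induction f generalizing g node s path with
  | zero => omega
  | succ f ih =>
    have hlen : 0 < (s ++ [node]).length := by simp
    have hcur : PySem.List.pyGetD (s ++ [node]) (-1) "" = node :=
      PySem.List.pyGetD_neg_one_append_singleton s node ""
    conv_lhs => rw [loopA]
    rw [if_pos hlen, hcur]
    simp only [dfsB]
    have hgd : (g.get? node).getD [] = g.getD node [] := rfl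
    by_cases hnil : g.getD node [] = []
    · have hcond : (!g.contains node || (g.getD node []).length == 0) = true := by
        simp [hnil]
      rw [if_pos hcond, if_pos (by simp [hgd, hnil] : ((g.get? node).getD []).isEmpty = true)]
      rw [List.dropLast_concat]
      exact loopA_mono f (f+1) g s (path ++ [node]) hnd (by omega) (by omega)
    · have hcond : ¬ (!g.contains node || (g.getD node []).length == 0) = true := by
        have hct : g.contains node = true := by
          rw [PySem.Dict.contains_eq_isSome_get?]
          cases hx : g.get? node with
          | none => exact absurd (by simp [PySem.Dict.getD_eq_get?_getD, hx]) hnil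
          | some v => rfl
        simp [hct, hnil]
      have he : ¬ ((g.get? node).getD []).isEmpty = true := by
        simpa [hgd, List.isEmpty_iff] using hnil
      rw [if_neg hcond, if_neg he]
      rw [slice_dropLast]
      have hgd2 : ((g.get? node).getD []).dropLast = (g.getD node []).dropLast := rfl
      have hnxt2 : PySem.List.pyGetD ((g.get? node).getD []) (-1) "" = PySem.List.pyGetD (g.getD node []) (-1) "" := rfl
      rw [hgd2, hnxt2]
      set nxt := PySem.List.pyGetD (g.getD node []) (-1) "" with hnxt
      set g1 := g.insert node (g.getD node []).dropLast with hg1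
      have hstep : eCnt g1 + 1 = eCnt g := by
        have := e_step g node hnd he
        rw [hg1]; rw [← hgd2]; exact this
      have hnd1 : g1.keys.Nodup := PySem.Dict.nodup_keys_insert g node _ hnd
      -- first IH application: run dfs on nxt with node still below it on the stack
      have h1 := ih g1 nxt (s ++ [node]) path hnd1 (by simp only [List.length_append, List.length_cons, List.length_nil]; omega)
      rw [h1]
      set r1 := dfsB (eCnt g1 + 1) g1 nxt with hr1
      have hnd2 : r1.1.keys.Nodup := dfsB_nodup _ _ _ hnd1
      have hle2 : eCnt r1.1 ≤ eCnt g1 := dfsB_le _ _ _ hnd1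
      -- second IH application: the continued while loop on node
      have h2 := ih r1.1 node s (path ++ r1.2) hnd2 (by omega)
      rw [h2]
      set r2 := dfsB (eCnt r1.1 + 1) r1.1 node with hr2
      have hnd3 : r2.1.keys.Nodup := dfsB_nodup _ _ _ hnd2
      have hle3 : eCnt r2.1 ≤ eCnt r1.1 := dfsB_le _ _ _ hnd2
      -- align the fuels of the dfsB calls on the right-hand side
      have hm1 : dfsB (eCnt g) g1 nxt = r1 := by
        rw [hr1]; exact dfsB_mono _ _ _ _ hnd1 (by omega) (by omega)
      have hm2 : dfsB (eCnt g) r1.1 node = r2 := by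
        rw [hr2]; exact dfsB_mono _ _ _ _ hnd2 (by omega) (by omega)
      rw [hm1, hm2, List.append_assoc]
      exact loopA_mono f (f+1) r2.1 s _ hnd3 (by omega) (by omega)

theorem build_eq (tickets : List (List String)) : buildB tickets = buildA tickets := rfl

theorem sort_eq (g : GD) : sortB g = sortA g := rfl

theorem build_nodup_ecnt (tickets : List (List String)) :
    (buildA tickets).keys.Nodup ∧ eCnt (buildA tickets) = tickets.length := by
  suffices h : ∀ (l : List (List String)) (g : GD), g.keys.Nodup →
      (l.foldl (fun g t =>
        g.insert (PySem.List.pyGetD t 0 "")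
          (g.getD (PySem.List.pyGetD t 0 "") [] ++ [PySem.List.pyGetD t 1 ""])) g).keys.Nodup ∧
      eCnt (l.foldl (fun g t =>
        g.insert (PySem.List.pyGetD t 0 "")
          (g.getD (PySem.List.pyGetD t 0 "") [] ++ [PySem.List.pyGetD t 1 ""])) g) = eCnt g + l.length by
    have := h tickets PySem.Dict.empty (by simp [PySem.Dict.empty, PySem.Dict.keys])
    simpa [buildA, eCnt, PySem.Dict.empty] using this
  intro l
  induction l with
  | nil => intro g hnd; simpa using hnd
  | cons t rest ih =>
    intro g hnd
    simp only [List.foldl_cons]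
    have hnd1 := PySem.Dict.nodup_keys_insert g (PySem.List.pyGetD t 0 "")
      (g.getD (PySem.List.pyGetD t 0 "") [] ++ [PySem.List.pyGetD t 1 ""]) hnd
    obtain ⟨h1, h2⟩ := ih _ hnd1
    refine ⟨h1, ?_⟩
    rw [h2]
    have := e_insert g (PySem.List.pyGetD t 0 "")
      (g.getD (PySem.List.pyGetD t 0 "") [] ++ [PySem.List.pyGetD t 1 ""]) hnd
    simp only [List.length_append, List.length_cons, List.length_nil] at this ⊢
    omega

theorem sortA_nodup_ecnt (g : GD) (hnd : g.keys.Nodup) :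
    (sortA g).keys.Nodup ∧ eCnt (sortA g) = eCnt g := by
  suffices h : ∀ (ks : List String) (d : GD), d.keys.Nodup →
      (ks.foldl (fun d k => d.insert k (PySem.List.sorted (d.getD k []) (fun x => x) true)) d).keys.Nodup ∧
      eCnt (ks.foldl (fun d k => d.insert k (PySem.List.sorted (d.getD k []) (fun x => x) true)) d) = eCnt d from
    h g.keys g hnd
  intro ks
  induction ks with
  | nil => intro d hnd; exact ⟨hnd, rfl⟩
  | cons k rest ih =>
    intro d hnd
    simp only [List.foldl_cons]
    have hnd1 := PySem.Dict.nodup_keys_insert d k (PySem.List.sorted (d.getD k []) (fun x => x) true) hnd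
    obtain ⟨h1, h2⟩ := ih _ hnd1
    refine ⟨h1, ?_⟩
    rw [h2]
    have := e_insert d k (PySem.List.sorted (d.getD k []) (fun x => x) true) hnd
    have hlen : (PySem.List.sorted (d.getD k []) (fun x => x) true).length = (d.getD k []).length :=
      PySem.List.length_sorted _ _ _
    omega

-- ===== VERDICT (by name: the statement is the Claim_ definition above) =====
theorem solution_spec : Claim_equal_solution := by
  intro tickets _ _
  unfold Spec_solution solution solution_alt
  rw [build_eq, sort_eq]
  obtain ⟨hnd0, he0⟩ := build_nodup_ecnt tickets
  obtain ⟨hnd1, he1⟩ := sortA_nodup_ecnt _ hnd0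
  have hE : eCnt (sortA (buildA tickets)) = tickets.length := by rw [he1, he0]
  have hsim := sim (2 * tickets.length + 1) (sortA (buildA tickets)) "ICN" [] [] hnd1 (by simp only [List.length_nil, hE]; omega)
  rw [hE] at hsim
  simp only [List.nil_append] at hsim
  rw [hsim, loopA_nil]
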